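-- pv_equiv track=rewrite | github.com/Ayesha-002/code-generation-agent | agent_code_writer/code_writer.py | _strip_non_code
-- ===== SOURCE A (Python) =====
-- def _strip_non_code(text: str) -> str:
--     """
--     Removes tests, outputs, markdown, and keeps only the function code.
--     """
--     lines = text.splitlines()
--     clean = []
--     recording = False
--
--     for line in lines:
--         stripped = line.strip()
--
--         # Start recording at function definition
--         if stripped.startswith("def "):
--             recording = True
--
--         # Stop if tests or output start
--         if recording:
--             if (
--                 stripped.startswith("###")
--                 or stripped.startswith(">>>")
--                 or stripped.startswith("print")
--             ):
--                 break
--             clean.append(line)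
--
--     return "\n".join(clean).strip()
-- ===== SOURCE B (Python) =====
-- def _strip_non_code(text: str) -> str:
--     """
--     Removes tests, outputs, markdown, and keeps only the function code.
--
--     Single backward pass (right fold): walking the lines back-to-front,
--     `run` is the longest stop-free prefix of the current suffix, and
--     `kept` is the answer for the current suffix (None while no 'def '
--     line has been seen yet).
--     """
--     kept = None
--     run = []
--     for line in reversed(text.splitlines()):
--         s = line.strip()
--         if s.startswith("###") or s.startswith(">>>") or s.startswith("print"):
--             run = []
--         else:
--             run = [line] + run
--         if s.startswith("def "):
--             kept = run
--     if kept is None: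
--         return ""
--     return "\n".join(kept).strip()
-- ===== Notes on version B (the rewrite author's own statement) =====
-- stated objective: alternative
-- what changed: Replaces A's forward loop with a recording flag and break by a single backward (reversed) pass: a right fold that maintains the stop-free run of the current suffix and the current answer, so the 'def ' anchor and the kept block are determined without any flag or break.
import Mathlib
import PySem

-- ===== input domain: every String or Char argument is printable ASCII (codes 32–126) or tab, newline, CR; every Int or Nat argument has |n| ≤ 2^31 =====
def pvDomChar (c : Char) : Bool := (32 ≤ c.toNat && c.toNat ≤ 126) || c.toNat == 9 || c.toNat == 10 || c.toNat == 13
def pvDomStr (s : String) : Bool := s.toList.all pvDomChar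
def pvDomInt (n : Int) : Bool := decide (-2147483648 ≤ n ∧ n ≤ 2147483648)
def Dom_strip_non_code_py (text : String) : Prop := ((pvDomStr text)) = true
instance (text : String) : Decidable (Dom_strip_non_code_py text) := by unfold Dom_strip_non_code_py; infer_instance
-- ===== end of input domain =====

-- B replaces A's forward recording-flag loop by a single backward pass (right fold) maintaining the stop-free run and the current answer (objective: alternative).


-- ===== PORT A =====
-- the for-loop: state (clean, recording); 'break' returns clean as-is
def pvALoop : List String → List String → Bool → List String
  | [], clean, _ => clean
  | line :: rest, clean, recording =>
    let stripped := PySem.Str.strip line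
    let recording := recording || PySem.Str.startswith stripped "def "
    if recording then
      if PySem.Str.startswith stripped "###" || PySem.Str.startswith stripped ">>>"
          || PySem.Str.startswith stripped "print" then
        clean
      else
        pvALoop rest (clean ++ [line]) recording
    else
      pvALoop rest clean recording

def strip_non_code_py (text : String) : String :=
  let lines := PySem.Str.splitlines text
  PySem.Str.strip (PySem.Str.join "\n" (pvALoop lines [] false))

-- ===== PORT B =====
def pvIsDef (line : String) : Bool :=
  PySem.Str.startswith (PySem.Str.strip line) "def "

def pvIsStop (line : String) : Bool :=
  let s := PySem.Str.strip line
  PySem.Str.startswith s "###" || PySem.Str.startswith s ">>>" || PySem.Str.startswith s "print"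

-- one step of B's backward pass: state (kept, run)
def pvBStep (st : Option (List String) × List String) (line : String) :
    Option (List String) × List String :=
  let run := if pvIsStop line then [] else line :: st.2
  (if pvIsDef line then some run else st.1, run)

def strip_non_code_py_alt (text : String) : String :=
  let lines := PySem.Str.splitlines text
  match (lines.reverse.foldl pvBStep (none, [])).1 with
  | none => ""
  | some kept => PySem.Str.strip (PySem.Str.join "\n" kept)

-- ===== PRECONDITION & SPEC =====
def Spec_strip_non_code_py (text : String) (out : String) : Prop := out = strip_non_code_py_alt text
instance (text : String) (out : String) : Decidable (Spec_strip_non_code_py text out) := by unfold Spec_strip_non_code_py; infer_instance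

-- ===== CLAIM (what is proved, stated in full; the proofs are below) =====
def Claim_equal_strip_non_code_py : Prop := ∀ (text : String), Dom_strip_non_code_py text → Spec_strip_non_code_py text (strip_non_code_py text)

-- ===== LEMMAS AND PROOFS =====

-- A's loop step, expressed through the named predicates (definitional)
theorem pvALoop_cons (line : String) (rest clean : List String) (recording : Bool) :
    pvALoop (line :: rest) clean recording =
      (if recording || pvIsDef line then
        if pvIsStop line then clean
        else pvALoop rest (clean ++ [line]) (recording || pvIsDef line)
      else pvALoop rest clean (recording || pvIsDef line)) := rfl

-- a line whose stripped form starts with "def " cannot be a stop line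
theorem pvIsStop_of_isDef (l : String) (h : pvIsDef l = true) : pvIsStop l = false := by
  unfold pvIsDef at h
  unfold pvIsStop
  simp only [PySem.Str.startswith_eq] at h ⊢
  rw [PySem.Chars.startswith_iff] at h
  obtain ⟨t, ht⟩ := h
  simp only [← ht]
  simp [PySem.Chars.startswith, List.isPrefixOf]

-- once recording, A's loop is a takeWhile over the remaining lines
theorem pvALoop_true (lines clean : List String) :
    pvALoop lines clean true = clean ++ lines.takeWhile (fun l => !pvIsStop l) := by
  induction lines generalizing clean with
  | nil => simp [pvALoop]
  | cons line rest ih =>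
    rw [pvALoop_cons]
    cases hs : pvIsStop line <;> simp [hs, ih]

-- the common characterisation: first def line, then takeWhile of the suffix
def pvAnchor (lines : List String) : Option (List String) :=
  match lines.findIdx? pvIsDef with
  | none => none
  | some i => some ((lines.drop i).takeWhile (fun l => !pvIsStop l))

-- before recording, A's loop finds the first def line, then takeWhiles the suffix
theorem pvALoop_false (lines clean : List String) :
    pvALoop lines clean false =
      match pvAnchor lines with
      | none => clean
      | some kept => clean ++ kept := by
  induction lines generalizing clean with
  | nil => simp [pvALoop, pvAnchor]
  | cons line rest ih =>
    rw [pvALoop_cons]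
    simp only [Bool.false_or]
    cases hd : pvIsDef line with
    | true =>
      have hstop := pvIsStop_of_isDef line hd
      simp [pvAnchor, hstop, pvALoop_true, List.findIdx?_cons, hd]
    | false =>
      rw [if_neg (by simp only [Bool.false_eq_true, not_false_eq_true]), ih]
      unfold pvAnchor
      have : (line :: rest).findIdx? pvIsDef = (rest.findIdx? pvIsDef).map (· + 1) := by
        simp [List.findIdx?_cons, hd]
      rw [this]
      cases rest.findIdx? pvIsDef with
      | none => rfl
      | some i => simp

-- B's backward fold computes (pvAnchor, the stop-free prefix)
theorem pvBFold (lines : List String) :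
    lines.reverse.foldl pvBStep (none, []) =
      (pvAnchor lines, lines.takeWhile (fun l => !pvIsStop l)) := by
  rw [List.foldl_reverse]
  induction lines with
  | nil => simp [pvAnchor]
  | cons line rest ih =>
    rw [List.foldr_cons, ih]
    unfold pvBStep
    cases hd : pvIsDef line with
    | true =>
      have hstop := pvIsStop_of_isDef line hd
      simp [pvAnchor, hstop, List.findIdx?_cons, hd, List.takeWhile]
    | false =>
      unfold pvAnchor
      have hfi : (line :: rest).findIdx? pvIsDef = (rest.findIdx? pvIsDef).map (· + 1) := by
        simp [List.findIdx?_cons, hd]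
      rw [hfi]
      cases hs : pvIsStop line with
      | true =>
        cases rest.findIdx? pvIsDef with
        | none => simp [hs, List.takeWhile]
        | some i => simp [hs, List.takeWhile]
      | false =>
        cases rest.findIdx? pvIsDef with
        | none => simp [hs, List.takeWhile]
        | some i => simp [hs, List.takeWhile]

-- ===== VERDICT (by name: the statement is the Claim_ definition above) =====
theorem strip_non_code_py_spec : Claim_equal_strip_non_code_py := by
  intro text _
  unfold Spec_strip_non_code_py strip_non_code_py strip_non_code_py_alt
  dsimp only
  rw [pvALoop_false, pvBFold]
  cases h : pvAnchor (PySem.Str.splitlines text) with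
  | none => rfl
  | some kept => rfl
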